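-- pv_equiv track=rewrite | github.com/HansKristjan99/OSKodutoo1 | Mäluhaldus.py | lastFit
-- ===== SOURCE A (Python) =====
-- def lastFit(taht, pikkus, väljundirida):
--     i = 0
--     mahub = False
--     algus = 0
--     voimalikud_kohad = []
--     while i<len(väljundirida)-pikkus +1:
--         #Vaatame, kas tükk mahuks siia
--         if väljundirida[i]=="-":
--             algus = i
--             mahub = True
--             #Uurime, kas tükk mahuks vahemikku [algus,algus+pikkus]
--             for j in range(pikkus):
--                 if väljundirida[algus + j] != "-":
--                     mahub = False
--                     break
--             if mahub:
--                 voimalikud_kohad.append((algus, algus+pikkus))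
--                 mahub = False
--             # Suurendame i-d, kuni jõuame uue tühja kohani
--             while i < len(väljundirida) and (väljundirida[i] == "-"):
--                 i += 1
--         else:
--             i+=1
--
--     if len(voimalikud_kohad)>0:
--         algus, lopp = voimalikud_kohad[-1]
--         for i in range(algus, lopp):
--             väljundirida[i]= taht
--         return väljundirida, True
--     else:
--         return väljundirida, False
-- ===== SOURCE B (Python) =====
-- def lastFit(taht, pikkus, väljundirida):
--     if pikkus < 1:
--         raise ValueError("block size must be positive")
--     # Scan from the right; the first run of '-' (found right-to-left) whose
--     # length is >= pikkus is the rightmost candidate: fill at its start.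
--     j = len(väljundirida)
--     while j > 0:
--         if väljundirida[j - 1] == "-":
--             end = j
--             while j > 0 and väljundirida[j - 1] == "-":
--                 j -= 1
--             if end - j >= pikkus:
--                 for k in range(j, j + pikkus):
--                     väljundirida[k] = taht
--                 return väljundirida, True
--         else:
--             j -= 1
--     return väljundirida, False
-- ===== Notes on version B (the rewrite author's own statement) =====
-- stated objective: alternative
-- what changed: B scans the row right-to-left and returns immediately at the first (i.e. rightmost) run of '-' whose length is >= pikkus, filling at its start, instead of A's left-to-right scan that collects every fitting run in a candidate list and then fills the last one; Pre_ excludes pikkus <= 0, where A raises IndexError and B raises ValueError.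
import Mathlib
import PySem

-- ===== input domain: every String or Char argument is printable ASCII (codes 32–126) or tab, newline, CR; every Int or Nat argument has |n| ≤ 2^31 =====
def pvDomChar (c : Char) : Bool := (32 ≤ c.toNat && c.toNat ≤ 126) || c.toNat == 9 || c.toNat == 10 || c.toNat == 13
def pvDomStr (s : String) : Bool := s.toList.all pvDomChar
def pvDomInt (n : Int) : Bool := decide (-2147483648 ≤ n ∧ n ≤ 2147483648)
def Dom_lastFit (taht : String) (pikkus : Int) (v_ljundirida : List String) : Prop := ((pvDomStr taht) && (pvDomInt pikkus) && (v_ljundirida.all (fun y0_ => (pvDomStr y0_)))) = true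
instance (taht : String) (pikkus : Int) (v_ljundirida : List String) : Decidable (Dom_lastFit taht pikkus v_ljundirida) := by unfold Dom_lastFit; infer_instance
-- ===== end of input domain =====

-- B scans right-to-left and returns at the first (= rightmost) fitting run of '-' instead of
-- collecting all candidates left-to-right and keeping the last (objective: alternative algorithm).
-- Both Pythons mutate väljundirida in place in the same way; the equivalence proved here is about the return value.

-- ===== PORT A =====
-- inner `for j in range(pikkus)` fit check (break on first non-dash = List.all short-circuit)
def pvCheckFit (v : List String) (algus pikkus : Int) : Bool :=
  (PySem.List.pyRange 0 pikkus 1).all (fun j => PySem.List.pyGet? v (algus + j) == some "-")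

-- inner `while i < len(v) and v[i] == "-": i += 1` (fuel ≥ len(v) - i suffices; caller passes len+1)
def pvSkipRun (v : List String) : Nat → Int → Int
  | 0, i => i
  | f+1, i =>
    if i < (v.length : Int) then
      if PySem.List.pyGet? v i == some "-" then pvSkipRun v f (i+1) else i
    else i

-- fill `for i in range(algus, lopp): v[i] = taht` (shared verbatim by both Pythons' fill loops)
def pvFill (taht : String) (a b : Int) (v : List String) : List String :=
  (PySem.List.pyRange a b 1).foldl (fun w i => PySem.List.pySetD w i taht) v

-- outer while loop of A; fuel len+1 is enough on every input A returns on (i grows by ≥ 1 per round)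
def pvFitLoop (pikkus : Int) (v : List String) : Nat → Int → List (Int × Int) → List (Int × Int)
  | 0, _, acc => acc
  | f+1, i, acc =>
    if i < (v.length : Int) - pikkus + 1 then
      if PySem.List.pyGet? v i == some "-" then
        pvFitLoop pikkus v f (pvSkipRun v (v.length + 1) i)
          (if pvCheckFit v i pikkus then acc ++ [(i, i + pikkus)] else acc)
      else
        pvFitLoop pikkus v f (i + 1) acc
    else acc

def lastFit (taht : String) (pikkus : Int) (v_ljundirida : List String) : List String × Bool :=
  match (pvFitLoop pikkus v_ljundirida (v_ljundirida.length + 1) 0 []).getLast? with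
  | some (algus, lopp) => (pvFill taht algus lopp v_ljundirida, true)
  | none => (v_ljundirida, false)

-- ===== PORT B =====
-- inner `while j > 0 and v[j-1] == "-": j -= 1`
def pvRunStart (v : List String) : Nat → Nat
  | 0 => 0
  | j+1 => if PySem.List.pyGet? v (j : Int) == some "-" then pvRunStart v j else j+1

theorem pvRunStart_le (v : List String) : ∀ j, pvRunStart v j ≤ j
  | 0 => Nat.le_refl 0
  | j+1 => by
    unfold pvRunStart
    split
    · exact Nat.le_succ_of_le (pvRunStart_le v j)
    · exact Nat.le_refl _

-- outer `while j > 0` loop of B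
def pvAltLoop (taht : String) (pikkus : Int) (v : List String) : Nat → List String × Bool
  | 0 => (v, false)
  | j+1 =>
    if h : PySem.List.pyGet? v (j : Int) == some "-" then
      if pikkus ≤ ((j : Int) + 1) - (pvRunStart v (j+1) : Int) then
        (pvFill taht (pvRunStart v (j+1)) ((pvRunStart v (j+1) : Int) + pikkus) v, true)
      else pvAltLoop taht pikkus v (pvRunStart v (j+1))
    else pvAltLoop taht pikkus v j
  decreasing_by
  · have hle := pvRunStart_le v j
    simp only [pvRunStart, h, if_true]
    omega
  · omega

def lastFit_alt (taht : String) (pikkus : Int) (v_ljundirida : List String) : List String × Bool :=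
  pvAltLoop taht pikkus v_ljundirida v_ljundirida.length

-- ===== PRECONDITION & SPEC =====
-- Pre_ excludes pikkus ≤ 0: there A's loop bound len-pikkus+1 exceeds len, so it reads
-- väljundirida[len] and raises IndexError (B's Python raises ValueError on the same inputs).
def Pre_lastFit (taht : String) (pikkus : Int) (v_ljundirida : List String) : Prop := 1 ≤ pikkus
instance (taht : String) (pikkus : Int) (v_ljundirida : List String) : Decidable (Pre_lastFit taht pikkus v_ljundirida) := by unfold Pre_lastFit; infer_instance
def pvWitness_lastFit : String × Int × List String := ("x", 1, ["-", "a"])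

def Spec_lastFit (taht : String) (pikkus : Int) (v_ljundirida : List String) (out : List String × Bool) : Prop := out = lastFit_alt taht pikkus v_ljundirida
instance (taht : String) (pikkus : Int) (v_ljundirida : List String) (out : List String × Bool) : Decidable (Spec_lastFit taht pikkus v_ljundirida out) := by unfold Spec_lastFit; infer_instance

-- ===== CLAIM (what is proved, stated in full; the proofs are below) =====
def Claim_equal_lastFit : Prop := ∀ (taht : String) (pikkus : Int) (v_ljundirida : List String), Dom_lastFit taht pikkus v_ljundirida → Pre_lastFit taht pikkus v_ljundirida → Spec_lastFit taht pikkus v_ljundirida (lastFit taht pikkus v_ljundirida)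

-- ===== LEMMAS AND PROOFS =====

-- s is a "qualifying start": a run of '-' of length ≥ pikkus, starting at a run boundary, fits at s
def pvQual (v : List String) (p : Int) (s : Nat) : Bool :=
  decide ((s : Int) + p ≤ (v.length : Int)) &&
  (List.range p.toNat).all (fun j => v[s+j]? == some "-") &&
  (s == 0 || !(v[s-1]? == some "-"))

-- greatest qualifying start s with i ≤ s and s < n, scanning n downward
def pvBest (v : List String) (p : Int) (i : Int) : Nat → Option Nat
  | 0 => none
  | n+1 => if pvQual v p n && decide (i ≤ (n : Int)) then some n else pvBest v p i n

theorem pvBest_succ (v : List String) (p : Int) (i : Int) (n : Nat) :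
    pvBest v p i (n+1) = if pvQual v p n && decide (i ≤ (n : Int)) then some n else pvBest v p i n := rfl

theorem pvQual_iff (v : List String) (p : Int) (s : Nat) :
    pvQual v p s = true ↔
      ((s : Int) + p ≤ (v.length : Int) ∧ (∀ j : Nat, j < p.toNat → v[s+j]? = some "-") ∧
        (s = 0 ∨ v[s-1]? ≠ some "-")) := by
  simp [pvQual, List.all_eq_true, List.mem_range]
  tauto

theorem pvQual_false_of_mid (v : List String) (p : Int) {t : Nat} (ht : t ≠ 0)
    (h : v[t-1]? = some "-") : pvQual v p t = false := by
  rw [Bool.eq_false_iff]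
  intro hq
  obtain ⟨-, -, h3⟩ := (pvQual_iff v p t).mp hq
  rcases h3 with h3 | h3
  · exact ht h3
  · exact h3 h

theorem pvQual_false_of_nodash (v : List String) (p : Int) (hp : 1 ≤ p) {t : Nat}
    (h : v[t]? ≠ some "-") : pvQual v p t = false := by
  rw [Bool.eq_false_iff]
  intro hq
  obtain ⟨-, h2, -⟩ := (pvQual_iff v p t).mp hq
  exact h (by simpa using h2 0 (by omega))

theorem pvBest_none (v : List String) (p : Int) (i : Int) (n : Nat)
    (h : ∀ s : Nat, s < n → pvQual v p s = true → ¬ i ≤ (s : Int)) : pvBest v p i n = none := by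
  induction n with
  | zero => rfl
  | succ n ih =>
    unfold pvBest
    rw [if_neg, ih (fun s hs => h s (by omega))]
    intro hc
    simp only [Bool.and_eq_true, decide_eq_true_eq] at hc
    exact h n (by omega) hc.1 hc.2

theorem pvBest_congr (v : List String) (p : Int) {i i' : Int} (hii' : i ≤ i') (n : Nat)
    (h : ∀ s : Nat, s < n → pvQual v p s = true → i ≤ (s : Int) → i' ≤ (s : Int)) :
    pvBest v p i n = pvBest v p i' n := by
  induction n with
  | zero => rfl
  | succ n ih =>
    unfold pvBest
    have : (pvQual v p n && decide (i ≤ (n : Int))) = (pvQual v p n && decide (i' ≤ (n : Int))) := by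
      by_cases hq : pvQual v p n = true
      · simp only [hq, Bool.true_and, decide_eq_decide]
        exact ⟨h n (by omega) hq, fun h' => le_trans hii' h'⟩
      · simp [Bool.not_eq_true] at hq; simp [hq]
    rw [this, ih (fun s hs => h s (by omega))]

theorem pvBest_absorb (v : List String) (p : Int) (i : Int) (n : Nat) (s0 : Nat) (e : Int)
    (hq : pvQual v p s0 = true) (hi : i ≤ (s0 : Int)) (hs0n : s0 < n) (hse : (s0 : Int) < e)
    (h : ∀ s : Nat, s < n → pvQual v p s = true → i ≤ (s : Int) → s = s0 ∨ e ≤ (s : Int)) :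
    pvBest v p i n = match pvBest v p e n with | some s => some s | none => some s0 := by
  induction n with
  | zero => omega
  | succ n ih =>
    rw [pvBest_succ, pvBest_succ]
    by_cases hqn : pvQual v p n = true
    · by_cases hen : e ≤ (n : Int)
      · simp only [hqn, Bool.true_and, decide_eq_true_eq]
        rw [if_pos (by omega), if_pos hen]
      · -- qual n, i ≤ n possible; then n = s0 by h
        by_cases hin : i ≤ (n : Int)
        · have hn : n = s0 := by
            rcases h n (by omega) hqn hin with h' | h'
            · exact h'
            · omega
          simp only [hqn, Bool.true_and]
          rw [if_pos (by simpa using hin), if_neg (by simpa using hen)]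
          have : pvBest v p e n = none := by
            apply pvBest_none
            intro s hs hqs his
            rcases h s (by omega) hqs (by omega) with h' | h' <;> omega
          rw [this]
          simp [hn]
        · exfalso; omega
    · have hs0n' : s0 < n := by
        rcases Nat.lt_succ_iff_lt_or_eq.mp hs0n with h' | h'
        · exact h'
        · exfalso; rw [h'] at hq; exact hqn hq
      simp only [Bool.not_eq_true] at hqn
      simp only [hqn, Bool.false_and, Bool.false_eq_true, if_false]
      exact ih hs0n' (fun s hs => h s (by omega))

theorem pvBest_drop (v : List String) (p : Int) (i : Int) {m n : Nat} (hmn : m ≤ n)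
    (h : ∀ t, m ≤ t → t < n → pvQual v p t = false) : pvBest v p i n = pvBest v p i m := by
  induction n with
  | zero => cases Nat.le_zero.mp hmn; rfl
  | succ n ih =>
    rcases Nat.lt_or_ge m (n+1) with hlt | hge
    · rw [pvBest_succ, h n (by omega) (by omega)]
      simp only [Bool.false_and, Bool.false_eq_true, if_false]
      exact ih (by omega) (fun t ht1 ht2 => h t ht1 (by omega))
    · have : m = n + 1 := by omega
      subst this; rfl

theorem pvBest_top (v : List String) (p : Int) {s0 n : Nat}
    (hq : pvQual v p s0 = true) (hs0n : s0 < n)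
    (h : ∀ t, s0 < t → t < n → pvQual v p t = false) : pvBest v p 0 n = some s0 := by
  induction n with
  | zero => omega
  | succ n ih =>
    rw [pvBest_succ]
    rcases Nat.lt_or_ge s0 n with hlt | hge
    · rw [h n (by omega) (by omega)]
      simp only [Bool.false_and, Bool.false_eq_true, if_false]
      exact ih (by omega) (fun t ht1 ht2 => h t ht1 (by omega))
    · have : s0 = n := by omega
      subst this
      rw [if_pos (by simp [hq])]

theorem pvSkipRun_spec (v : List String) : ∀ (f : Nat) (i : Int), 0 ≤ i → i ≤ (v.length : Int) →
    (v.length : Int) - i ≤ (f : Int) →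
    i ≤ pvSkipRun v f i ∧ pvSkipRun v f i ≤ (v.length : Int) ∧
    (∀ k : Int, i ≤ k → k < pvSkipRun v f i → PySem.List.pyGet? v k = some "-") ∧
    (pvSkipRun v f i = (v.length : Int) ∨ PySem.List.pyGet? v (pvSkipRun v f i) ≠ some "-") := by
  intro f
  induction f with
  | zero =>
    intro i h0 hlen hf
    have : i = (v.length : Int) := by omega
    simp only [pvSkipRun]
    exact ⟨le_rfl, hlen, fun k hk1 hk2 => absurd hk2 (by omega), Or.inl this⟩
  | succ f ih =>
    intro i h0 hlen hf
    simp only [pvSkipRun]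
    by_cases hi : i < (v.length : Int)
    · rw [if_pos hi]
      by_cases hd : PySem.List.pyGet? v i == some "-"
      · rw [if_pos hd]
        obtain ⟨e1, e2, e3, e4⟩ := ih (i+1) (by omega) (by omega) (by push_cast at hf ⊢; omega)
        refine ⟨by omega, e2, ?_, e4⟩
        intro k hk1 hk2
        rcases eq_or_lt_of_le hk1 with h' | h'
        · rw [← h']; exact of_decide_eq_true (by simpa using hd)
        · exact e3 k (by omega) hk2
      · rw [if_neg hd]
        exact ⟨le_rfl, hlen, fun k hk1 hk2 => absurd hk2 (by omega),
          Or.inr (by simpa using hd)⟩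
    · rw [if_neg hi]
      exact ⟨le_rfl, hlen, fun k hk1 hk2 => absurd hk2 (by omega), Or.inl (by omega)⟩

theorem pvCheckFit_iff (v : List String) (i p : Int) :
    pvCheckFit v i p = true ↔ ∀ x : Int, 0 ≤ x → x < p → PySem.List.pyGet? v (i + x) = some "-" := by
  simp [pvCheckFit, List.all_eq_true, PySem.List.mem_pyRange_one]

theorem pvRunStart_spec (v : List String) : ∀ j, j ≤ v.length →
    (∀ k, pvRunStart v j ≤ k → k < j → v[k]? = some "-") ∧
    (pvRunStart v j = 0 ∨ v[pvRunStart v j - 1]? ≠ some "-") := by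
  intro j
  induction j with
  | zero =>
    intro _
    exact ⟨fun k hk1 hk2 => absurd hk2 (by omega), Or.inl rfl⟩
  | succ j ih =>
    intro hj
    obtain ⟨e1, e2⟩ := ih (by omega)
    simp only [pvRunStart]
    by_cases hd : PySem.List.pyGet? v (j : Int) == some "-"
    · rw [if_pos hd]
      refine ⟨?_, e2⟩
      intro k hk1 hk2
      rcases Nat.lt_or_ge k j with h' | h'
      · exact e1 k hk1 h'
      · have : k = j := by omega
        subst this
        exact of_decide_eq_true (by simpa using hd)
    · rw [if_neg hd]
      refine ⟨fun k hk1 hk2 => absurd hk2 (by omega), Or.inr ?_⟩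
      simp only [Nat.add_sub_cancel]
      simpa using hd

theorem pvFitLoop_spec (v : List String) (p : Int) (hp : 1 ≤ p) :
    ∀ (f : Nat) (i : Int) (acc : List (Int × Int)), 0 ≤ i →
    (v.length : Int) - p + 1 - i ≤ (f : Int) →
    (PySem.List.pyGet? v i = some "-" → i = 0 ∨ PySem.List.pyGet? v (i-1) ≠ some "-") →
    (pvFitLoop p v f i acc).getLast? =
      match pvBest v p i v.length with
      | some s => some ((s : Int), (s : Int) + p)
      | none => acc.getLast? := by
  intro f
  induction f with
  | zero =>
    intro i acc h0 hf _
    simp only [pvFitLoop]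
    rw [pvBest_none v p i v.length (fun s hs hq hi => by
      obtain ⟨c1, -, -⟩ := (pvQual_iff v p s).mp hq
      omega)]
  | succ f ih =>
    intro i acc h0 hf ha
    have hinat : (i.toNat : Int) = i := Int.toNat_of_nonneg h0
    simp only [pvFitLoop]
    by_cases hcond : i < (v.length : Int) - p + 1
    · rw [if_pos hcond]
      have hilt : i < (v.length : Int) := by omega
      by_cases hd : (PySem.List.pyGet? v i == some "-") = true
      · rw [if_pos hd]
        have hdi : PySem.List.pyGet? v i = some "-" := by simpa using hd
        have hstep : pvSkipRun v (v.length + 1) i = pvSkipRun v v.length (i + 1) := by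
          simp only [pvSkipRun]
          rw [if_pos hilt, if_pos hd]
        obtain ⟨e1, e2, e3, e4⟩ := pvSkipRun_spec v v.length (i+1) (by omega) (by omega) (by omega)
        rw [hstep]
        set e := pvSkipRun v v.length (i+1) with he
        have hdash : ∀ k : Int, i ≤ k → k < e → PySem.List.pyGet? v k = some "-" := by
          intro k hk1 hk2
          rcases eq_or_lt_of_le hk1 with h' | h'
          · rwa [← h']
          · exact e3 k (by omega) hk2
        have hanew : PySem.List.pyGet? v e = some "-" → e = 0 ∨ PySem.List.pyGet? v (e-1) ≠ some "-" := by
          intro hde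
          rcases e4 with h' | h'
          · rw [h', PySem.List.pyGet?_natCast] at hde
            simp at hde
          · exact absurd hde h'
        have hmid : ∀ s : Nat, i < (s : Int) → (s : Int) < e → pvQual v p s = false := by
          intro s hs1 hs2
          refine pvQual_false_of_mid v p (by omega) ?_
          have := hdash ((s : Int) - 1) (by omega) (by omega)
          rwa [show (s : Int) - 1 = ((s - 1 : Nat) : Int) by omega, PySem.List.pyGet?_natCast] at this
        have hq_iff : pvQual v p i.toNat = true ↔ pvCheckFit v i p = true := by
          rw [pvQual_iff, pvCheckFit_iff]
          constructor
          · rintro ⟨-, h2, -⟩ x hx1 hx2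
            have := h2 x.toNat (by omega)
            rwa [show i + x = ((i.toNat + x.toNat : Nat) : Int) by omega,
              PySem.List.pyGet?_natCast]
          · intro hcf
            refine ⟨by omega, ?_, ?_⟩
            · intro jj hjj
              have := hcf (jj : Int) (by omega) (by omega)
              rwa [show i + (jj : Int) = ((i.toNat + jj : Nat) : Int) by omega,
                PySem.List.pyGet?_natCast] at this
            · by_cases hi0 : i = 0
              · left; omega
              · right
                rcases ha hdi with h' | h'
                · exact absurd h' hi0
                · intro hcontra
                  apply h'
                  rwa [show i - 1 = ((i.toNat - 1 : Nat) : Int) by omega,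
                    PySem.List.pyGet?_natCast]
        by_cases hc : pvCheckFit v i p = true
        · rw [if_pos hc]
          rw [ih e (acc ++ [(i, i + p)]) (by omega) (by omega) hanew]
          have hqs : pvQual v p i.toNat = true := hq_iff.mpr hc
          rw [pvBest_absorb v p i v.length i.toNat e hqs (by omega) (by omega) (by omega)
            (fun s hs hq hi => by
              rcases le_or_gt e (s : Int) with h' | h'
              · exact Or.inr h'
              · left
                by_contra hne
                have hlt : i < (s : Int) := by
                  rcases eq_or_lt_of_le hi with h'' | h''
                  · exact absurd (by omega) hne
                  · exact h''
                rw [hmid s hlt h'] at hq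
                cases hq)]
          cases hbe : pvBest v p e v.length with
          | some s' => rfl
          | none => simp [List.getLast?_concat, hinat]
        · rw [if_neg hc]
          rw [ih e acc (by omega) (by omega) hanew]
          rw [pvBest_congr v p (show i ≤ e by omega) v.length
            (fun s hs hq hi => by
              by_contra hne
              have hse : (s : Int) < e := by omega
              rcases eq_or_lt_of_le hi with h'' | h''
              · have : s = i.toNat := by omega
                rw [this, hq_iff] at hq
                exact hc hq
              · rw [hmid s h'' hse] at hq
                cases hq)]
      · rw [if_neg hd]
        have hdi : ¬ PySem.List.pyGet? v i = some "-" := by simpa using hd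
        rw [ih (i+1) acc (by omega) (by omega)
          (fun h' => Or.inr (by rwa [show i + 1 - 1 = i by ring]))]
        rw [pvBest_congr v p (show i ≤ i + 1 by omega) v.length
          (fun s hs hq hi => by
            by_contra hne
            have : s = i.toNat := by omega
            subst this
            rw [pvQual_false_of_nodash v p hp (by rwa [← PySem.List.pyGet?_natCast, hinat])] at hq
            cases hq)]
    · rw [if_neg hcond]
      rw [pvBest_none v p i v.length (fun s hs hq hi => by
        obtain ⟨c1, -, -⟩ := (pvQual_iff v p s).mp hq
        omega)]

theorem pvAltLoop_spec (v : List String) (t : String) (p : Int) (hp : 1 ≤ p) :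
    ∀ j, j ≤ v.length →
    (j = v.length ∨ v[j]? ≠ some "-" ∨ j = 0 ∨ v[j-1]? ≠ some "-") →
    pvAltLoop t p v j =
      match pvBest v p 0 j with
      | some s => (pvFill t (s : Int) ((s : Int) + p) v, true)
      | none => (v, false) := by
  intro j
  induction j using Nat.strong_induction_on with
  | _ j ih =>
    match j with
    | 0 => intro _ _; simp [pvAltLoop, pvBest]
    | j+1 =>
      intro hj hb
      simp only [pvAltLoop]
      by_cases hd : (PySem.List.pyGet? v (j : Int) == some "-") = true
      · have hdj : v[j]? = some "-" := by simpa using hd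
        have hbnd : j+1 = v.length ∨ v[j+1]? ≠ some "-" := by
          rcases hb with h | h | h | h
          · exact Or.inl h
          · exact Or.inr h
          · omega
          · exact absurd hdj (by simpa using h)
        have hs_le : pvRunStart v (j+1) ≤ j := by
          simp only [pvRunStart, hd, if_true]
          exact pvRunStart_le v j
        obtain ⟨r1, r2⟩ := pvRunStart_spec v (j+1) hj
        rw [dif_pos hd]
        by_cases hfit : p ≤ ((j : Int) + 1) - (pvRunStart v (j+1) : Int)
        · rw [if_pos hfit]
          have hqs : pvQual v p (pvRunStart v (j+1)) = true := by
            rw [pvQual_iff]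
            refine ⟨by push_cast; omega, ?_, r2⟩
            intro jj hjj
            refine r1 _ (by omega) ?_
            have : (jj : Int) < p := by
              have := Int.toNat_of_nonneg (le_trans (by omega) hp)
              omega
            omega
          have hqf : ∀ tt, pvRunStart v (j+1) < tt → tt < j+1 → pvQual v p tt = false := by
            intro tt ht1 ht2
            exact pvQual_false_of_mid v p (by omega) (r1 (tt-1) (by omega) (by omega))
          rw [pvBest_top v p hqs (by omega) hqf]
        · rw [if_neg hfit]
          have hqf : ∀ tt, pvRunStart v (j+1) ≤ tt → tt < j+1 → pvQual v p tt = false := by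
            intro tt ht1 ht2
            rcases Nat.lt_or_ge (pvRunStart v (j+1)) tt with h' | h'
            · exact pvQual_false_of_mid v p (by omega) (r1 (tt-1) (by omega) (by omega))
            · have htt : tt = pvRunStart v (j+1) := by omega
              rw [Bool.eq_false_iff]
              intro hq
              obtain ⟨c1, c2, -⟩ := (pvQual_iff v p tt).mp hq
              have hplen : (j+1 : Int) < (tt : Int) + p := by omega
              have hjlen : j + 1 < v.length := by push_cast at c1; omega
              have hdash : v[j+1]? = some "-" := by
                have := c2 (j+1-tt) (by
                  have := Int.toNat_of_nonneg (le_trans (by omega) hp)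
                  omega)
                rwa [show tt + (j+1-tt) = j+1 by omega] at this
              rcases hbnd with h'' | h''
              · omega
              · exact h'' hdash
          rw [pvBest_drop v p 0 (by omega : pvRunStart v (j+1) ≤ j+1) hqf]
          exact ih (pvRunStart v (j+1)) (by omega) (by omega)
            (by rcases r2 with h' | h' <;> [exact Or.inr (Or.inr (Or.inl h')); exact Or.inr (Or.inr (Or.inr h'))])
      · have hdj : ¬ v[j]? = some "-" := by simpa using hd
        rw [dif_neg hd]
        rw [pvBest_drop v p 0 (by omega : j ≤ j+1)
          (fun t ht1 ht2 => by
            have : t = j := by omega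
            subst this
            exact pvQual_false_of_nodash v p hp hdj)]
        exact ih j (by omega) (by omega) (Or.inr (Or.inl hdj))

-- ===== VERDICT (by name: the statement is the Claim_ definition above) =====
theorem lastFit_spec : Claim_equal_lastFit := by
  intro taht p v _ hp
  unfold Pre_lastFit at hp
  unfold Spec_lastFit lastFit lastFit_alt
  rw [pvFitLoop_spec v p hp (v.length + 1) 0 [] le_rfl (by push_cast; omega)
    (fun _ => Or.inl rfl)]
  rw [pvAltLoop_spec v taht p hp v.length le_rfl (Or.inl rfl)]
  cases pvBest v p 0 v.length <;> rfl
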